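-- pv_equiv track=rewrite | github.com/P4ral1ax/Projects | CSEC/onion_decode.py | find_base
-- ===== SOURCE A (Python) =====
-- def find_base(cipher):
--     temp = cipher[0:]
--     base32NoNo = ['0', '1', '8', '9']
--     for char in cipher:
--         if char.islower():
--             return '64'
--     for char in cipher:
--         if char in base32NoNo:
--             return '16'
--     return '32'
-- ===== SOURCE B (Python) =====
-- def _char_rank(ch):
--     if ch.islower():
--         return 2
--     if ch in '0189':
--         return 1
--     return 0
--
-- def find_base(cipher):
--     rank = max(map(_char_rank, cipher), default=0)
--     return ('32', '16', '64')[rank]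
-- ===== Notes on version B (the rewrite author's own statement) =====
-- stated objective: alternative
-- what changed: Recasts the two priority-ordered early-return scans as a map/reduce: each character is mapped to a numeric severity rank (lowercase=2, '0189' digit=1, else 0), the ranks are reduced with max, and the answer is read from a table indexed by that maximum.
import Mathlib
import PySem

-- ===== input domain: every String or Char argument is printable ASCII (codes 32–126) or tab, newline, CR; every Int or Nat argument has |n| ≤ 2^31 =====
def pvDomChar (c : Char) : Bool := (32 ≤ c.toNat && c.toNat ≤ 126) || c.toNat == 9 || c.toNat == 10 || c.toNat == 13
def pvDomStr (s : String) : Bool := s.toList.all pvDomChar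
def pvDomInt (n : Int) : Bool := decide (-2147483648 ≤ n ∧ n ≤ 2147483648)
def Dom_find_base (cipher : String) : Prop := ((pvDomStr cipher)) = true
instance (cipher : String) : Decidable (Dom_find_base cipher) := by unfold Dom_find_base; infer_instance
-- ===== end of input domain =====

-- B recasts A's two priority-ordered early-return scans as a map/reduce: per-character
-- severity ranks reduced with max, answer read from a table (objective: alternative).

-- ===== PORT A =====
-- first loop: return '64' at the first lowercase char
def findBaseScanLower : List Char → Option String
  | [] => none
  | c :: cs => if PySem.Chars.islower c then some "64" else findBaseScanLower cs

-- second loop: return '16' at the first char in base32NoNo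
def findBaseScanNoNo (base32NoNo : List Char) : List Char → Option String
  | [] => none
  | c :: cs => if c ∈ base32NoNo then some "16" else findBaseScanNoNo base32NoNo cs

def find_base (cipher : String) : String :=
  let _temp := PySem.List.slice cipher.toList (some 0) none  -- temp = cipher[0:], unused in A
  let base32NoNo : List Char := ['0', '1', '8', '9']
  match findBaseScanLower cipher.toList with
  | some r => r
  | none =>
    match findBaseScanNoNo base32NoNo cipher.toList with
    | some r => r
    | none => "32"

-- ===== PORT B =====
-- _char_rank: lowercase → 2, digit in '0189' → 1, else 0
def findBaseCharRank (ch : Char) : Nat :=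
  if PySem.Chars.islower ch then 2
  else if ch ∈ ['0', '1', '8', '9'] then 1
  else 0

def find_base_alt (cipher : String) : String :=
  let rank := (cipher.toList.map findBaseCharRank).foldl Nat.max 0  -- max(…, default=0)
  ["32", "16", "64"].getD rank "32"  -- ('32','16','64')[rank]; rank ≤ 2 always

-- ===== PRECONDITION & SPEC =====
def Spec_find_base (cipher : String) (out : String) : Prop := out = find_base_alt cipher
instance (cipher : String) (out : String) : Decidable (Spec_find_base cipher out) := by unfold Spec_find_base; infer_instance

-- ===== CLAIM (what is proved, stated in full; the proofs are below) =====
def Claim_equal_find_base : Prop := ∀ (cipher : String), Dom_find_base cipher → Spec_find_base cipher (find_base cipher)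

-- ===== LEMMAS AND PROOFS =====
theorem findBaseScanLower_eq (cs : List Char) :
    findBaseScanLower cs = if cs.any PySem.Chars.islower then some "64" else none := by
  induction cs with
  | nil => simp [findBaseScanLower]
  | cons c cs ih =>
    simp only [findBaseScanLower, List.any_cons, ih]
    by_cases h : PySem.Chars.islower c = true <;> simp [h]

theorem findBaseScanNoNo_eq (nn cs : List Char) :
    findBaseScanNoNo nn cs = if cs.any (fun c => decide (c ∈ nn)) then some "16" else none := by
  induction cs with
  | nil => simp [findBaseScanNoNo]
  | cons c cs ih =>
    simp only [findBaseScanNoNo, List.any_cons, ih]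
    by_cases h : c ∈ nn <;> simp [h]

-- proof-only helper: the combined severity of a whole list, in A's priority form
def findBaseRankAll (cs : List Char) : Nat :=
  if cs.any PySem.Chars.islower then 2
  else if cs.any (fun c => decide (c ∈ ['0', '1', '8', '9'])) then 1
  else 0

theorem findBaseRankAll_le (cs : List Char) : findBaseRankAll cs ≤ 2 := by
  unfold findBaseRankAll; split_ifs <;> omega

theorem findBaseRank_step (c : Char) (cs : List Char) :
    Nat.max (findBaseCharRank c) (findBaseRankAll cs) = findBaseRankAll (c :: cs) := by
  have h := findBaseRankAll_le cs
  unfold findBaseCharRank findBaseRankAll at *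
  by_cases h1 : PySem.Chars.islower c = true <;>
    by_cases h2 : c ∈ ['0', '1', '8', '9'] <;>
      simp only [List.any_cons, h1, h2, decide_true, decide_false,
        Bool.true_or, Bool.false_or, if_true, if_false] <;>
      split_ifs at * <;> simp_all

theorem findBaseMaxRank_eq (cs : List Char) (a : Nat) :
    (cs.map findBaseCharRank).foldl Nat.max a = Nat.max a (findBaseRankAll cs) := by
  induction cs generalizing a with
  | nil => simp [findBaseRankAll]
  | cons c cs ih =>
    rw [List.map_cons, List.foldl_cons, ih, ← findBaseRank_step]
    exact Nat.max_assoc a _ _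

-- ===== VERDICT (by name: the statement is the Claim_ definition above) =====
theorem find_base_spec : Claim_equal_find_base := by
  intro cipher _
  unfold Spec_find_base find_base find_base_alt
  simp only [findBaseScanLower_eq, findBaseScanNoNo_eq, findBaseMaxRank_eq]
  unfold findBaseRankAll
  by_cases h1 : cipher.toList.any PySem.Chars.islower = true <;>
    by_cases h2 : (cipher.toList.any fun c => decide (c ∈ ['0', '1', '8', '9'])) = true <;>
      simp only [h1, h2, if_true] <;> rfl
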